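-- pv_equiv track=rewrite | github.com/ZJU-ACES-ISE/YALP | utils/utils_template.py | all_common_substrings
-- ===== SOURCE A (Python) =====
-- def all_common_substrings(text1, text2):
--     """
--     计算两个文本的所有公共子序列块
--     """
--     m, n = len(text1), len(text2)
--
--     # 创建一个二维数组用于存储中间结果
--     dp = [[0] * (n + 1) for _ in range(m + 1)]
--
--     # 填充dp数组
--     for i in range(1, m + 1):
--         for j in range(1, n + 1):
--             if text1[i - 1] == text2[j - 1]:
--                 dp[i][j] = dp[i - 1][j - 1] + 1
--             else:
--                 dp[i][j] = max(dp[i - 1][j], dp[i][j - 1])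
--
--     # 通过dp数组回溯得到最长公共子序列
--     lcs_list = []
--     lcs = []
--     i, j = m, n
--     while i > 0 and j > 0:
--         if text1[i - 1] == text2[j - 1]:
--             lcs.append(text1[i - 1])
--             i -= 1
--             j -= 1
--         else:
--             if dp[i - 1][j] >= dp[i][j - 1]:
--                 i -= 1
--             else:
--                 j -= 1
--             if len(lcs) > 0:
--                 lcs_list.append(lcs[::-1])
--             lcs = []
--     if len(lcs) > 0:
--         lcs_list.append(lcs[::-1])
--     return lcs_list[::-1]
-- ===== SOURCE B (Python) =====
-- def all_common_substrings(text1, text2):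
--     m, n = len(text1), len(text2)
--     # DP table built row by row (no preallocation/mutation)
--     prev = [0] * (n + 1)
--     dp = [prev]
--     for i in range(1, m + 1):
--         row = [0]
--         for j in range(1, n + 1):
--             if text1[i - 1] == text2[j - 1]:
--                 row.append(prev[j - 1] + 1)
--             else:
--                 row.append(max(prev[j], row[j - 1]))
--         dp.append(row)
--         prev = row
--     # Backtrack: record matched characters with their positions, flat.
--     matches = []
--     i, j = m, n
--     while i > 0 and j > 0:
--         if text1[i - 1] == text2[j - 1]:
--             matches.append((i, j, text1[i - 1]))
--             i -= 1
--             j -= 1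
--         elif dp[i - 1][j] >= dp[i][j - 1]:
--             i -= 1
--         else:
--             j -= 1
--     matches.reverse()
--     # Second pass: group diagonally consecutive matches into blocks.
--     blocks = []
--     cur = []
--     prev_pos = None
--     for (i, j, c) in matches:
--         if prev_pos == (i - 1, j - 1):
--             cur.append(c)
--         else:
--             if cur:
--                 blocks.append(cur)
--             cur = [c]
--         prev_pos = (i, j)
--     if cur:
--         blocks.append(cur)
--     return blocks
-- ===== Notes on version B (the rewrite author's own statement) =====
-- stated objective: alternative
-- what changed: B builds the DP table row-by-row by appending (no preallocated mutated grid) and replaces A's flush-blocks-during-backtrack loop with a backtrack that records a flat list of matched (i,j,char) positions followed by a separate grouping pass that starts a new block whenever consecutive matches are not diagonally adjacent.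
import Mathlib
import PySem

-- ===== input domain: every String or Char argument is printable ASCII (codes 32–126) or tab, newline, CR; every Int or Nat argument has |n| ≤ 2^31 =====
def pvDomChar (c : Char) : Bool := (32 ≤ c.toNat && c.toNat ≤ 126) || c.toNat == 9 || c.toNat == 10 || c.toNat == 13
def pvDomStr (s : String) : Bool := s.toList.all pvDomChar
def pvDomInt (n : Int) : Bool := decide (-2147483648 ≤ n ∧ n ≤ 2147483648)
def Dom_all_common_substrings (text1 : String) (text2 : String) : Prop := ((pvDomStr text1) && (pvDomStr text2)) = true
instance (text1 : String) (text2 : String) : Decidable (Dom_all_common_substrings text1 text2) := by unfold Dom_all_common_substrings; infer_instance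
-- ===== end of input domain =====

-- B builds the DP table row-by-row by appending and splits A's flushing backtrack into a flat
-- match-collecting backtrack plus a separate diagonal-adjacency grouping pass (alternative decomposition, same cost).


-- ===== PORT A =====
-- A's dp fill: preallocated (m+1)×(n+1) zero grid mutated in place by nested loops.
-- range(1, m+1) runs over nonnegative Python ints, ported as the Nat values 1..m;
-- dp[i][j] with in-range nonnegative indices is ported as getD (exact here).
def pvFillA (t1 t2 : List Char) (m n : Nat) : List (List Int) :=
  ((List.range m).map (· + 1)).foldl (fun dp i =>
    ((List.range n).map (· + 1)).foldl (fun dp j =>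
      let v : Int :=
        if t1.getD (i-1) ' ' = t2.getD (j-1) ' ' then
          (dp.getD (i-1) []).getD (j-1) 0 + 1
        else
          max ((dp.getD (i-1) []).getD j 0) ((dp.getD i []).getD (j-1) 0)
      dp.set i ((dp.getD i []).set j v)) dp)
    ((List.range (m+1)).map (fun _ => List.replicate (n+1) (0:Int)))

-- A's while-loop backtrack: flushes the pending run into lcs_list at every non-match step,
-- final flush after the loop, result reversed.  State (i+1, j+1) is Python's (i, j) > 0.
def pvBackA (t1 t2 : List Char) (dp : List (List Int)) :
    Nat → Nat → List String → List (List String) → List (List String)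
  | i+1, j+1, lcs, acc =>
      if t1.getD i ' ' = t2.getD j ' ' then
        pvBackA t1 t2 dp i j (lcs ++ [String.singleton (t1.getD i ' ')]) acc
      else
        if (dp.getD i []).getD (j+1) 0 ≥ (dp.getD (i+1) []).getD j 0 then
          pvBackA t1 t2 dp i (j+1) [] (if lcs ≠ [] then acc ++ [lcs.reverse] else acc)
        else
          pvBackA t1 t2 dp (i+1) j [] (if lcs ≠ [] then acc ++ [lcs.reverse] else acc)
  | 0, _, lcs, acc => (if lcs ≠ [] then acc ++ [lcs.reverse] else acc).reverse
  | _+1, 0, lcs, acc => (if lcs ≠ [] then acc ++ [lcs.reverse] else acc).reverse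
  termination_by i j _ _ => i + j
  decreasing_by all_goals omega

def all_common_substrings (text1 : String) (text2 : String) : List (List String) :=
  let t1 := text1.toList
  let t2 := text2.toList
  pvBackA t1 t2 (pvFillA t1 t2 t1.length t2.length) t1.length t2.length [] []

-- ===== PORT B =====
-- B's dp row: built left to right by appending, reading the previous row.
def pvRowB (t1 t2 : List Char) (prev : List Int) (i n : Nat) : List Int :=
  ((List.range n).map (· + 1)).foldl (fun row j =>
    row ++ [if t1.getD (i-1) ' ' = t2.getD (j-1) ' ' then prev.getD (j-1) 0 + 1
            else max (prev.getD j 0) (row.getD (j-1) 0)]) [0]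

-- B's dp fill: dp = [prev]; for each i append a freshly built row.
def pvFillB (t1 t2 : List Char) (m n : Nat) : List (List Int) :=
  (((List.range m).map (· + 1)).foldl (fun st i =>
      let row := pvRowB t1 t2 st.2 i n
      (st.1 ++ [row], row))
    ([List.replicate (n+1) (0:Int)], List.replicate (n+1) (0:Int))).1

-- B's backtrack: records each matched character with its (i, j) position, no block handling.
def pvCollectB (t1 t2 : List Char) (dp : List (List Int)) :
    Nat → Nat → List (Nat × Nat × String) → List (Nat × Nat × String)
  | i+1, j+1, acc =>
      if t1.getD i ' ' = t2.getD j ' ' then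
        pvCollectB t1 t2 dp i j (acc ++ [(i+1, j+1, String.singleton (t1.getD i ' '))])
      else if (dp.getD i []).getD (j+1) 0 ≥ (dp.getD (i+1) []).getD j 0 then
        pvCollectB t1 t2 dp i (j+1) acc
      else
        pvCollectB t1 t2 dp (i+1) j acc
  | 0, _, acc => acc
  | _+1, 0, acc => acc
  termination_by i j _ => i + j
  decreasing_by all_goals omega

-- B's grouping pass step: start a new block unless the match is diagonally adjacent to the previous one.
def pvGroupStep (st : List (List String) × List String × Option (Nat × Nat))
    (x : Nat × Nat × String) : List (List String) × List String × Option (Nat × Nat) :=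
  if st.2.2 = some (x.1 - 1, x.2.1 - 1) then
    (st.1, st.2.1 ++ [x.2.2], some (x.1, x.2.1))
  else
    ((if st.2.1 ≠ [] then st.1 ++ [st.2.1] else st.1), [x.2.2], some (x.1, x.2.1))

def all_common_substrings_alt (text1 : String) (text2 : String) : List (List String) :=
  let t1 := text1.toList
  let t2 := text2.toList
  let dp := pvFillB t1 t2 t1.length t2.length
  let ms := (pvCollectB t1 t2 dp t1.length t2.length []).reverse
  let st := ms.foldl pvGroupStep ([], [], none)
  if st.2.1 ≠ [] then st.1 ++ [st.2.1] else st.1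

-- ===== PRECONDITION & SPEC =====
def Spec_all_common_substrings (text1 : String) (text2 : String) (out : List (List String)) : Prop := out = all_common_substrings_alt text1 text2
instance (text1 : String) (text2 : String) (out : List (List String)) : Decidable (Spec_all_common_substrings text1 text2 out) := by unfold Spec_all_common_substrings; infer_instance

-- ===== CLAIM (what is proved, stated in full; the proofs are below) =====
def Claim_equal_all_common_substrings : Prop := ∀ (text1 : String) (text2 : String), Dom_all_common_substrings text1 text2 → Spec_all_common_substrings text1 text2 (all_common_substrings text1 text2)

-- ===== LEMMAS AND PROOFS =====

-- The LCS-length recurrence both tables compute.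
def pvL (t1 t2 : List Char) : Nat → Nat → Int
  | 0, _ => 0
  | _+1, 0 => 0
  | i+1, j+1 =>
      if t1.getD i ' ' = t2.getD j ' ' then pvL t1 t2 i j + 1
      else max (pvL t1 t2 i (j+1)) (pvL t1 t2 (i+1) j)

lemma pvL_zero_left (t1 t2 : List Char) (j : Nat) : pvL t1 t2 0 j = 0 := by simp [pvL]

lemma pvL_zero_right (t1 t2 : List Char) (i : Nat) : pvL t1 t2 i 0 = 0 := by
  cases i <;> simp [pvL]

-- The partially filled table: rows < i final, row i filled up to column k, rest zero.
def pvTab (t1 t2 : List Char) (m n i k : Nat) : List (List Int) :=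
  (List.range (m+1)).map (fun r => (List.range (n+1)).map (fun j =>
    if r < i ∨ (r = i ∧ j ≤ k) then pvL t1 t2 r j else 0))

lemma pvTab_row (t1 t2 : List Char) (m n i k r : Nat) (hr : r ≤ m) :
    (pvTab t1 t2 m n i k).getD r [] =
      (List.range (n+1)).map (fun j => if r < i ∨ (r = i ∧ j ≤ k) then pvL t1 t2 r j else 0) := by
  unfold pvTab
  exact PySem.List.getD_map_range _ _ _ _ (by omega)

lemma pvTab_get (t1 t2 : List Char) (m n i k r j : Nat) (hr : r ≤ m) (hj : j ≤ n) :
    ((pvTab t1 t2 m n i k).getD r []).getD j 0 =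
      if r < i ∨ (r = i ∧ j ≤ k) then pvL t1 t2 r j else 0 := by
  rw [pvTab_row t1 t2 m n i k r hr]
  exact PySem.List.getD_map_range _ _ _ _ (by omega)

lemma pvTab_zero (t1 t2 : List Char) (m n : Nat) :
    (List.range (m+1)).map (fun _ => List.replicate (n+1) (0:Int)) = pvTab t1 t2 m n 0 n := by
  refine List.ext_getElem (by simp [pvTab]) ?_
  intro r h1 h2
  simp only [pvTab, List.getElem_map, List.getElem_range]
  refine List.ext_getElem (by simp) ?_
  intro j hj1 hj2
  simp only [List.getElem_replicate, List.getElem_map, List.getElem_range]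
  split_ifs with h
  · rcases h with h | ⟨rfl, _⟩
    · omega
    · rw [pvL_zero_left]
  · rfl

lemma pvTab_roll (t1 t2 : List Char) (m n i : Nat) :
    pvTab t1 t2 m n i n = pvTab t1 t2 m n (i+1) 0 := by
  refine List.ext_getElem (by simp [pvTab]) ?_
  intro r h1 h2
  simp only [pvTab, List.getElem_map, List.getElem_range]
  refine List.ext_getElem (by simp) ?_
  intro j hj1 hj2
  simp only [List.getElem_map, List.getElem_range]
  simp only [List.length_map, List.length_range] at hj1
  split_ifs with h h'
  · rfl
  · exfalso; omega
  · obtain rfl : j = 0 := by omega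
    rw [pvL_zero_right]
  · rfl

-- Writing the next cell into the partial table.
lemma pvTab_set (t1 t2 : List Char) (m n i k : Nat) (him : i ≤ m) (_hk : k < n) :
    (pvTab t1 t2 m n i k).set i (((pvTab t1 t2 m n i k).getD i []).set (k+1) (pvL t1 t2 i (k+1)))
      = pvTab t1 t2 m n i (k+1) := by
  rw [pvTab_row t1 t2 m n i k i him]
  refine List.ext_getElem (by simp [pvTab]) ?_
  intro r h1 h2
  simp only [List.length_set, pvTab, List.length_map, List.length_range] at h1 h2
  rw [List.getElem_set]
  simp only [pvTab, List.getElem_map, List.getElem_range]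
  split_ifs with hri
  · subst hri
    refine List.ext_getElem (by simp) ?_
    intro j hj1 hj2
    simp only [List.length_set, List.length_map, List.length_range] at hj1
    rw [List.getElem_set]
    simp only [List.getElem_map, List.getElem_range, lt_irrefl, false_or, true_and]
    by_cases hjk : k + 1 = j
    · subst hjk
      rw [if_pos rfl, if_pos (le_refl _)]
    · rw [if_neg hjk]
      split_ifs with h h' <;> first | rfl | omega
  · refine List.ext_getElem (by simp) ?_
    intro j hj1 hj2
    simp only [List.getElem_map, List.getElem_range]
    split_ifs with h h' <;> first | rfl | omega

-- A's inner loop fills row a+1 left to right.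
lemma pvFillA_inner (t1 t2 : List Char) (m n a : Nat) (hm : a + 1 ≤ m) :
    ∀ k, k ≤ n →
    ((List.range k).map (· + 1)).foldl (fun dp j =>
        let v : Int :=
          if t1.getD ((a+1)-1) ' ' = t2.getD (j-1) ' ' then
            (dp.getD ((a+1)-1) []).getD (j-1) 0 + 1
          else
            max ((dp.getD ((a+1)-1) []).getD j 0) ((dp.getD (a+1) []).getD (j-1) 0)
        dp.set (a+1) ((dp.getD (a+1) []).set j v)) (pvTab t1 t2 m n (a+1) 0)
      = pvTab t1 t2 m n (a+1) k := by
  intro k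
  induction k with
  | zero => intro _; simp
  | succ k ih =>
      intro hk
      rw [show List.range (k+1) = List.range k ++ [k] from List.range_succ,
        List.map_append, List.foldl_append, ih (by omega)]
      simp only [List.map_cons, List.map_nil, List.foldl_cons, List.foldl_nil,
        Nat.add_sub_cancel]
      have hv :
          (if t1.getD a ' ' = t2.getD k ' ' then
            ((pvTab t1 t2 m n (a+1) k).getD a []).getD k 0 + 1
          else
            max (((pvTab t1 t2 m n (a+1) k).getD a []).getD (k+1) 0)
              (((pvTab t1 t2 m n (a+1) k).getD (a+1) []).getD k 0))
            = pvL t1 t2 (a+1) (k+1) := by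
        rw [pvTab_get t1 t2 m n (a+1) k a k (by omega) (by omega),
            pvTab_get t1 t2 m n (a+1) k a (k+1) (by omega) (by omega),
            pvTab_get t1 t2 m n (a+1) k (a+1) k (by omega) (by omega),
            if_pos (show a < a+1 ∨ (a = a+1 ∧ k ≤ k) by omega),
            if_pos (show a < a+1 ∨ (a = a+1 ∧ k+1 ≤ k) by omega),
            if_pos (show a+1 < a+1 ∨ (a+1 = a+1 ∧ k ≤ k) by omega)]
        simp [pvL]
      rw [hv]
      exact pvTab_set t1 t2 m n (a+1) k (by omega) (by omega)

-- A's fill produces the full table.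
lemma pvFillA_eq (t1 t2 : List Char) (m n : Nat) :
    pvFillA t1 t2 m n = pvTab t1 t2 m n m n := by
  unfold pvFillA
  have main : ∀ i, i ≤ m →
      ((List.range i).map (· + 1)).foldl (fun dp i =>
        ((List.range n).map (· + 1)).foldl (fun dp j =>
          let v : Int :=
            if t1.getD (i-1) ' ' = t2.getD (j-1) ' ' then
              (dp.getD (i-1) []).getD (j-1) 0 + 1
            else
              max ((dp.getD (i-1) []).getD j 0) ((dp.getD i []).getD (j-1) 0)
          dp.set i ((dp.getD i []).set j v)) dp)
        ((List.range (m+1)).map (fun _ => List.replicate (n+1) (0:Int)))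
      = pvTab t1 t2 m n i n := by
    intro i
    induction i with
    | zero => intro _; simpa using pvTab_zero t1 t2 m n
    | succ a ih =>
        intro hm
        rw [show List.range (a+1) = List.range a ++ [a] from List.range_succ,
          List.map_append, List.foldl_append, ih (by omega)]
        simp only [List.map_cons, List.map_nil, List.foldl_cons, List.foldl_nil]
        rw [pvTab_roll]
        exact pvFillA_inner t1 t2 m n a hm n (le_refl n)
  exact main m (le_refl m)

-- B's inner fold builds row a+1 left to right.
lemma pvRowB_aux (t1 t2 : List Char) (n a : Nat) :
    ∀ k, k ≤ n →
    ((List.range k).map (· + 1)).foldl (fun row j =>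
      row ++ [if t1.getD ((a+1)-1) ' ' = t2.getD (j-1) ' ' then
                ((List.range (n+1)).map (pvL t1 t2 a)).getD (j-1) 0 + 1
              else
                max (((List.range (n+1)).map (pvL t1 t2 a)).getD j 0) (row.getD (j-1) 0)]) [0]
      = (List.range (k+1)).map (pvL t1 t2 (a+1)) := by
  intro k
  induction k with
  | zero =>
      intro _
      rw [show List.range 1 = [0] from rfl]
      simp [pvL_zero_right]
  | succ k ih =>
      intro hk
      rw [show List.range (k+1) = List.range k ++ [k] from List.range_succ,
        List.map_append, List.foldl_append, ih (by omega)]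
      simp only [List.map_cons, List.map_nil, List.foldl_cons, List.foldl_nil,
        Nat.add_sub_cancel]
      rw [PySem.List.getD_map_range _ _ _ _ (by omega : k < n + 1),
          PySem.List.getD_map_range _ _ _ _ (by omega : k + 1 < n + 1),
          PySem.List.getD_map_range _ _ _ _ (by omega : k < k + 1),
          show List.range (k+1+1) = List.range (k+1) ++ [k+1] from List.range_succ,
          List.map_append]
      congr 1
      simp [pvL]

lemma pvRowB_eq (t1 t2 : List Char) (n a : Nat) :
    pvRowB t1 t2 ((List.range (n+1)).map (pvL t1 t2 a)) (a+1) n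
      = (List.range (n+1)).map (pvL t1 t2 (a+1)) := by
  unfold pvRowB
  exact pvRowB_aux t1 t2 n a n (le_refl n)

lemma pvRow_zero (t1 t2 : List Char) (n : Nat) :
    List.replicate (n+1) (0:Int) = (List.range (n+1)).map (pvL t1 t2 0) := by
  refine List.ext_getElem (by simp) ?_
  intro j h1 h2
  simp [pvL_zero_left]

-- B's fill produces the same full table.
lemma pvFillB_eq (t1 t2 : List Char) (m n : Nat) :
    pvFillB t1 t2 m n = (List.range (m+1)).map (fun r => (List.range (n+1)).map (pvL t1 t2 r)) := by
  unfold pvFillB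
  have main : ∀ i, i ≤ m →
      ((List.range i).map (· + 1)).foldl (fun st i =>
        let row := pvRowB t1 t2 st.2 i n
        (st.1 ++ [row], row))
        ([List.replicate (n+1) (0:Int)], List.replicate (n+1) (0:Int))
      = ((List.range (i+1)).map (fun r => (List.range (n+1)).map (pvL t1 t2 r)),
         (List.range (n+1)).map (pvL t1 t2 i)) := by
    intro i
    induction i with
    | zero =>
        intro _
        rw [show List.range 1 = [0] from rfl]
        simp [← pvRow_zero t1 t2 n]
    | succ a ih =>
        intro hm
        rw [show List.range (a+1) = List.range a ++ [a] from List.range_succ,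
          List.map_append, List.foldl_append, ih (by omega)]
        simp only [List.map_cons, List.map_nil, List.foldl_cons, List.foldl_nil]
        rw [pvRowB_eq t1 t2 n a,
          show List.range (a+1+1) = List.range (a+1) ++ [a+1] from List.range_succ,
          List.map_append]
        rfl
  rw [main m (le_refl m)]

lemma pvFill_eq (t1 t2 : List Char) (m n : Nat) :
    pvFillA t1 t2 m n = pvFillB t1 t2 m n := by
  rw [pvFillA_eq, pvFillB_eq]
  refine List.ext_getElem (by simp [pvTab]) ?_
  intro r h1 h2
  simp only [pvTab, List.length_map, List.length_range] at h1
  simp only [pvTab, List.getElem_map, List.getElem_range]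
  refine List.ext_getElem (by simp) ?_
  intro j hj1 hj2
  simp only [List.length_map, List.length_range] at hj1
  simp only [List.getElem_map, List.getElem_range]
  rw [if_pos (by omega)]

-- ---- backtrack vs collect-then-group (for an arbitrary shared dp table) ----

lemma pvCollectB_acc (t1 t2 : List Char) (dp : List (List Int)) :
    ∀ s i j, i + j ≤ s → ∀ acc,
      pvCollectB t1 t2 dp i j acc = acc ++ pvCollectB t1 t2 dp i j [] := by
  intro s
  induction s with
  | zero =>
      intro i j hs acc
      obtain rfl : i = 0 := by omega
      simp [pvCollectB]
  | succ s ih =>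
      intro i j hs acc
      match i, j with
      | 0, j => simp [pvCollectB]
      | i+1, 0 => simp [pvCollectB]
      | i+1, j+1 =>
          simp only [pvCollectB, List.nil_append]
          split_ifs with h1 h2
          · rw [ih i j (by omega) (acc ++ [(i+1, j+1, String.singleton (t1.getD i ' '))]),
              ih i j (by omega) [(i+1, j+1, String.singleton (t1.getD i ' '))]]
            simp
          · exact ih i (j+1) (by omega) acc
          · exact ih (i+1) j (by omega) acc

lemma pvCollectB_mem (t1 t2 : List Char) (dp : List (List Int)) :
    ∀ s i j, i + j ≤ s → ∀ x, x ∈ pvCollectB t1 t2 dp i j [] →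
      t1.getD (x.1 - 1) ' ' = t2.getD (x.2.1 - 1) ' ' := by
  intro s
  induction s with
  | zero =>
      intro i j hs x hx
      obtain rfl : i = 0 := by omega
      simp [pvCollectB] at hx
  | succ s ih =>
      intro i j hs x hx
      match i, j with
      | 0, j => simp [pvCollectB] at hx
      | i+1, 0 => simp [pvCollectB] at hx
      | i+1, j+1 =>
          simp only [pvCollectB, List.nil_append] at hx
          split_ifs at hx with h1 h2
          · rw [pvCollectB_acc t1 t2 dp (i+j) i j (le_refl _)
                [(i+1, j+1, String.singleton (t1.getD i ' '))]] at hx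
            rcases List.mem_append.1 hx with hx | hx
            · simp only [List.mem_singleton] at hx
              subst hx
              simpa using h1
            · exact ih i j (by omega) x hx
          · exact ih i (j+1) (by omega) x hx
          · exact ih (i+1) j (by omega) x hx

lemma pvGroup_prev (ms : List (Nat × Nat × String)) (p q : Nat) :
    (ms.foldl pvGroupStep ([], [], none)).2.2 = some (p, q) → ∃ c, (p, q, c) ∈ ms := by
  induction ms using List.reverseRecOn with
  | nil => simp
  | append_singleton ms x _ =>
      rw [List.foldl_append]
      simp only [List.foldl_cons, List.foldl_nil]
      intro h
      have hx : (pvGroupStep (ms.foldl pvGroupStep ([], [], none)) x).2.2 = some (x.1, x.2.1) := by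
        unfold pvGroupStep; split_ifs <;> rfl
      rw [hx] at h
      obtain ⟨h1, h2⟩ : x.1 = p ∧ x.2.1 = q := by
        simpa [Prod.ext_iff] using h
      exact ⟨x.2.2, by rw [← h1, ← h2]; simp⟩

-- What B's grouping still produces from a state when A's pending run (reversed, starting
-- at position (i+1, j+1)) is still to be merged in and the final flush applied.
def pvMergeTail (st : List (List String) × List String × Option (Nat × Nat))
    (i j : Nat) (lcs : List String) : List (List String) :=
  if lcs = [] then (if st.2.1 ≠ [] then st.1 ++ [st.2.1] else st.1)
  else if st.2.2 = some (i, j) then st.1 ++ [st.2.1 ++ lcs.reverse]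
  else (if st.2.1 ≠ [] then st.1 ++ [st.2.1] else st.1) ++ [lcs.reverse]

lemma pvMergeTail_step (st : List (List String) × List String × Option (Nat × Nat))
    (i j : Nat) (c : String) (lcs : List String) :
    pvMergeTail st i j (lcs ++ [c]) = pvMergeTail (pvGroupStep st (i+1, j+1, c)) (i+1) (j+1) lcs := by
  rcases st with ⟨b, cur, prev⟩
  by_cases hp : prev = some (i, j) <;> by_cases hl : lcs = [] <;>
    simp [pvMergeTail, pvGroupStep, hp, hl, List.reverse_append]

lemma pvMergeTail_nil (st : List (List String) × List String × Option (Nat × Nat)) (i j : Nat) :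
    pvMergeTail st i j [] = (if st.2.1 ≠ [] then st.1 ++ [st.2.1] else st.1) := by
  simp [pvMergeTail]

lemma pvMergeTail_far (st : List (List String) × List String × Option (Nat × Nat)) (i j : Nat)
    (lcs : List String) (hl : lcs ≠ []) (hp : st.2.2 ≠ some (i, j)) :
    pvMergeTail st i j lcs = (if st.2.1 ≠ [] then st.1 ++ [st.2.1] else st.1) ++ [lcs.reverse] := by
  simp [pvMergeTail, hl, hp]

-- The key invariant: A's backtrack equals B's grouping of B's collected matches,
-- with A's pending run merged in and A's accumulated blocks appended (reversed).
lemma pvBackA_eq (t1 t2 : List Char) (dp : List (List Int)) :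
    ∀ s i j, i + j ≤ s → ∀ lcs acc,
      pvBackA t1 t2 dp i j lcs acc =
        pvMergeTail (((pvCollectB t1 t2 dp i j []).reverse).foldl pvGroupStep ([], [], none))
          i j lcs ++ acc.reverse := by
  intro s
  induction s with
  | zero =>
      intro i j hs lcs acc
      obtain rfl : i = 0 := by omega
      by_cases hl : lcs = [] <;>
        simp [pvBackA, pvCollectB, pvMergeTail, hl, List.reverse_append]
  | succ s ih =>
      intro i j hs lcs acc
      match i, j with
      | 0, j =>
          by_cases hl : lcs = [] <;>
            simp [pvBackA, pvCollectB, pvMergeTail, hl, List.reverse_append]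
      | i+1, 0 =>
          by_cases hl : lcs = [] <;>
            simp [pvBackA, pvCollectB, pvMergeTail, hl, List.reverse_append]
      | i+1, j+1 =>
          rw [show pvBackA t1 t2 dp (i+1) (j+1) lcs acc =
            (if t1.getD i ' ' = t2.getD j ' ' then
              pvBackA t1 t2 dp i j (lcs ++ [String.singleton (t1.getD i ' ')]) acc
            else
              if (dp.getD i []).getD (j+1) 0 ≥ (dp.getD (i+1) []).getD j 0 then
                pvBackA t1 t2 dp i (j+1) [] (if lcs ≠ [] then acc ++ [lcs.reverse] else acc)
              else
                pvBackA t1 t2 dp (i+1) j [] (if lcs ≠ [] then acc ++ [lcs.reverse] else acc))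
            from by rw [pvBackA]]
          simp only [pvCollectB, List.nil_append]
          by_cases h1 : t1.getD i ' ' = t2.getD j ' '
          · -- matched step
            rw [if_pos h1, if_pos h1, ih i j (by omega),
              pvCollectB_acc t1 t2 dp (i+j) i j (le_refl _)
                [(i+1, j+1, String.singleton (t1.getD i ' '))],
              List.reverse_append, List.foldl_append]
            simp only [List.reverse_cons, List.reverse_nil, List.nil_append,
              List.foldl_cons, List.foldl_nil]
            rw [pvMergeTail_step, h1]
          · rw [if_neg h1, if_neg h1]
            by_cases h2 : (dp.getD i []).getD (j+1) 0 ≥ (dp.getD (i+1) []).getD j 0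
            · -- non-match, move i
              rw [if_pos h2, if_pos h2, ih i (j+1) (by omega)]
              have hne : (((pvCollectB t1 t2 dp i (j+1) []).reverse).foldl pvGroupStep
                  ([], [], none)).2.2 ≠ some (i+1, j+1) := by
                intro hsome
                obtain ⟨c, hc⟩ := pvGroup_prev _ _ _ hsome
                rw [List.mem_reverse] at hc
                have := pvCollectB_mem t1 t2 dp (i+(j+1)) i (j+1) (le_refl _) _ hc
                simp only [Nat.add_sub_cancel] at this
                exact h1 this
              rw [pvMergeTail_nil]
              by_cases hl : lcs = []
              · rw [hl, pvMergeTail_nil]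
                simp
              · rw [pvMergeTail_far _ _ _ _ hl hne, if_pos hl]
                simp [List.reverse_append]
            · -- non-match, move j
              rw [if_neg h2, if_neg h2, ih (i+1) j (by omega)]
              have hne : (((pvCollectB t1 t2 dp (i+1) j []).reverse).foldl pvGroupStep
                  ([], [], none)).2.2 ≠ some (i+1, j+1) := by
                intro hsome
                obtain ⟨c, hc⟩ := pvGroup_prev _ _ _ hsome
                rw [List.mem_reverse] at hc
                have := pvCollectB_mem t1 t2 dp ((i+1)+j) (i+1) j (le_refl _) _ hc
                simp only [Nat.add_sub_cancel] at this
                exact h1 this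
              rw [pvMergeTail_nil]
              by_cases hl : lcs = []
              · rw [hl, pvMergeTail_nil]
                simp
              · rw [pvMergeTail_far _ _ _ _ hl hne, if_pos hl]
                simp [List.reverse_append]

-- ===== VERDICT (by name: the statement is the Claim_ definition above) =====
theorem all_common_substrings_spec : Claim_equal_all_common_substrings := by
  intro text1 text2 _
  have ha : all_common_substrings text1 text2 =
      pvBackA text1.toList text2.toList
        (pvFillA text1.toList text2.toList text1.toList.length text2.toList.length)
        text1.toList.length text2.toList.length [] [] := rfl
  have hb : all_common_substrings_alt text1 text2 =
      (let st := ((pvCollectB text1.toList text2.toList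
          (pvFillB text1.toList text2.toList text1.toList.length text2.toList.length)
          text1.toList.length text2.toList.length []).reverse).foldl pvGroupStep ([], [], none)
        if st.2.1 ≠ [] then st.1 ++ [st.2.1] else st.1) := rfl
  show all_common_substrings text1 text2 = all_common_substrings_alt text1 text2
  rw [ha, hb, pvFill_eq,
    pvBackA_eq text1.toList text2.toList _ (text1.toList.length + text2.toList.length)
      _ _ (le_refl _) [] [],
    pvMergeTail_nil]
  simp
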